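-- pv_equiv track=rewrite | github.com/gaurav-kumar-gks/prep | dsa/monotonic_queue.py | decreasing_queue
-- ===== SOURCE A (Python) =====
-- import collections
--
-- def decreasing_queue(A):
--     queue = collections.deque()
--     l = [-1]*len(A)
--     r = [-1]*len(A)
--     for i, v in enumerate(A):
--         while queue and A[queue[-1]] <= v:
--             r[queue.pop()] = v
--         if queue:
--             l[i] = A[queue[-1]]
--         queue.append(i)
--     return l, r
-- ===== SOURCE B (Python) =====
-- def decreasing_queue(A):
--     n = len(A)
--     l = [next((A[j] for j in range(i - 1, -1, -1) if A[j] > A[i]), -1) for i in range(n)]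
--     r = [next((A[j] for j in range(i + 1, n) if A[j] >= A[i]), -1) for i in range(n)]
--     return l, r
-- ===== Notes on version B (the rewrite author's own statement) =====
-- stated objective: simpler
-- what changed: Replaced the fused single-pass monotonic index stack (which writes l and r through index assignments while popping) with two direct brute-force scans: for each position, scan left for the first strictly greater value and scan right for the first greater-or-equal value.
import Mathlib
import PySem

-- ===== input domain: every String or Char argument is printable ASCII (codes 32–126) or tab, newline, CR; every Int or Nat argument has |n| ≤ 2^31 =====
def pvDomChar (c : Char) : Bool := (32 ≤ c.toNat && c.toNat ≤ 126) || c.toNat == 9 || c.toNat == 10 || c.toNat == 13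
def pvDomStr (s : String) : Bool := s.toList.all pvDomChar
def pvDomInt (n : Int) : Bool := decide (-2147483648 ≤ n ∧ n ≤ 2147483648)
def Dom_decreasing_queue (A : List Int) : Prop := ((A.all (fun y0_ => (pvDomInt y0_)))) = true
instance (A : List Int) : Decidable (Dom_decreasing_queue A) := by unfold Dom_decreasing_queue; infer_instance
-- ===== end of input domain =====

-- B replaces A's fused single-pass monotonic index stack by two plain brute-force scans
-- (objective: simpler; same return value, no speed claim).

-- ===== PORT A =====
-- the inner `while queue and A[queue[-1]] <= v: r[queue.pop()] = v` loop; the stack's head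
-- is the right end (queue[-1]) of the Python deque.  Stack entries are always indices into A
-- (appended from enumerate), hence in range, so `A.getD t 0` is exact for `A[t]`.
def popPhase (A : List Int) (v : Int) : List Nat → List Int → List Nat × List Int
  | [], r => ([], r)
  | t :: s, r =>
    if A.getD t 0 ≤ v then popPhase A v s (r.set t v)
    else (t :: s, r)

-- the `for i, v in enumerate(A)` loop body, step for step
def aLoop (A : List Int) : List (Nat × Int) → List Nat → List Int → List Int → List Int × List Int
  | [], _, l, r => (l, r)
  | (i, v) :: rest, stack, l, r =>
    let p := popPhase A v stack r
    let l' := match p.1 with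
      | [] => l
      | t :: _ => l.set i (A.getD t 0)
    aLoop A rest (i :: p.1) l' p.2

-- `enumerate(A)` yields the pairs (i, A[i]) for i = 0..len(A)-1; the (nonnegative) Python
-- indices are represented as Nat, and A[i] is in range, so `A.getD i 0` is exact.
def decreasing_queue (A : List Int) : List Int × List Int :=
  aLoop A ((List.range A.length).map (fun i => (i, A.getD i 0)))
    [] (List.replicate A.length (-1)) (List.replicate A.length (-1))

-- ===== PORT B =====
-- `next((A[j] for j in range(i-1,-1,-1) if A[j] > A[i]), -1)`: the first element of the
-- reversed prefix A[0:i] that is > A[i], else -1 — exact.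
def prevG (A : List Int) (i : Nat) : Int :=
  (((A.take i).reverse).find? (fun x => decide (A.getD i 0 < x))).getD (-1)

-- `next((A[j] for j in range(i+1,n) if A[j] >= A[i]), -1)`: the first element of A[i+1:]
-- that is ≥ A[i], else -1 — exact.
def nextGE (A : List Int) (i : Nat) : Int :=
  ((A.drop (i+1)).find? (fun x => decide (A.getD i 0 ≤ x))).getD (-1)

def decreasing_queue_alt (A : List Int) : List Int × List Int :=
  ((List.range A.length).map (prevG A), (List.range A.length).map (nextGE A))

-- ===== PRECONDITION & SPEC =====
def Spec_decreasing_queue (A : List Int) (out : List Int × List Int) : Prop := out = decreasing_queue_alt A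
instance (A : List Int) (out : List Int × List Int) : Decidable (Spec_decreasing_queue A out) := by unfold Spec_decreasing_queue; infer_instance

-- ===== CLAIM (what is proved, stated in full; the proofs are below) =====
def Claim_equal_decreasing_queue : Prop := ∀ (A : List Int), Dom_decreasing_queue A → Spec_decreasing_queue A (decreasing_queue A)

-- ===== LEMMAS AND PROOFS =====

-- the r-array value after k loop steps: first element of A[j+1:k] that is ≥ A[j], else -1
def rAt (A : List Int) (k j : Nat) : Int :=
  (((A.drop (j+1)).take (k - (j+1))).find? (fun x => decide (A.getD j 0 ≤ x))).getD (-1)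

-- loop invariant after processing the first k elements
def InvQ (A : List Int) (k : Nat) (s : List Nat) (l r : List Int) : Prop :=
  (∀ j, j ∈ s ↔ j < k ∧ ∀ j', j < j' → j' < k → A.getD j' 0 < A.getD j 0) ∧
  s.Pairwise (· > ·) ∧
  l.length = A.length ∧ (∀ i, i < A.length → l.getD i 0 = if i < k then prevG A i else -1) ∧
  r.length = A.length ∧ (∀ j, j < A.length → r.getD j 0 = rAt A k j)

lemma popPhase_eq (A : List Int) (v : Int) :
    ∀ (s : List Nat) (r : List Int),
      popPhase A v s r =
        (s.dropWhile (fun t => decide (A.getD t 0 ≤ v)),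
         (s.takeWhile (fun t => decide (A.getD t 0 ≤ v))).foldl (fun r t => r.set t v) r) := by
  intro s
  induction s with
  | nil => intro r; simp [popPhase, List.dropWhile_nil, List.takeWhile_nil]
  | cons t s ih =>
    intro r
    by_cases h : A.getD t 0 ≤ v
    · simp only [popPhase, List.dropWhile_cons, List.takeWhile_cons, h, decide_true,
        if_true, List.foldl_cons, ih]
    · simp only [popPhase, List.dropWhile_cons, List.takeWhile_cons, h, decide_false,
        if_false, List.foldl_nil]
      simp

lemma foldl_set_getD (v : Int) :
    ∀ (tw : List Nat) (r : List Int) (j : Nat), j < r.length →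
      (tw.foldl (fun r t => r.set t v) r).getD j 0 =
        if j ∈ tw then v else r.getD j 0 := by
  intro tw
  induction tw with
  | nil => intro r j hj; simp
  | cons t tw ih =>
    intro r j hj
    rw [List.foldl_cons, ih _ j (by simpa using hj)]
    by_cases hm : j ∈ tw
    · simp [hm]
    · by_cases he : j = t
      · subst he
        simp [hm, List.getD_eq_getElem?_getD, List.getElem?_set, hj]
      · simp [hm, he, List.getD_eq_getElem?_getD, List.getElem?_set, Ne.symm he]

lemma foldl_set_length (v : Int) :
    ∀ (tw : List Nat) (r : List Int), (tw.foldl (fun r t => r.set t v) r).length = r.length := by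
  intro tw
  induction tw with
  | nil => intro r; rfl
  | cons t tw ih => intro r; rw [List.foldl_cons, ih]; simp

-- A[0..k).reverse viewed one step at a time
lemma take_succ_reverse (A : List Int) (m : Nat) (hm : m < A.length) :
    (A.take (m+1)).reverse = A.getD m 0 :: (A.take m).reverse := by
  rw [List.take_succ]
  simp [List.getElem?_eq_getElem hm, List.getD_eq_getElem?_getD]

-- the window A[j+1:k] one step at a time
lemma wnd_succ (A : List Int) (j k : Nat) (hj : j < k) (hk : k < A.length) :
    (A.drop (j+1)).take (k+1 - (j+1)) = (A.drop (j+1)).take (k - (j+1)) ++ [A.getD k 0] := by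
  have h1 : k + 1 - (j+1) = (k - (j+1)) + 1 := by omega
  rw [h1, List.take_succ]
  have h2 : k - (j+1) < (A.drop (j+1)).length := by simp; omega
  have h3 : (A.drop (j+1))[k - (j+1)]'h2 = A.getD k 0 := by
    rw [List.getElem_drop]
    rw [List.getD_eq_getElem _ _ (by omega)]
    congr 1; omega
  rw [List.getElem?_eq_getElem h2, h3]
  rfl

-- no j' ∈ (j,k) with A[j'] ≥ A[j]  ⇒  the window find? is none
lemma wnd_none (A : List Int) (j : Nat) :
    ∀ k, k ≤ A.length → (∀ j', j < j' → j' < k → A.getD j' 0 < A.getD j 0) →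
      ((A.drop (j+1)).take (k - (j+1))).find? (fun x => decide (A.getD j 0 ≤ x)) = none := by
  intro k
  induction k with
  | zero => intro _ _; simp
  | succ k ih =>
    intro hk hno
    by_cases hjk : j < k
    · rw [wnd_succ A j k hjk (by omega), List.find?_append,
        ih (by omega) (fun j' h1 h2 => hno j' h1 (by omega))]
      have hno2 := hno k hjk (by omega)
      simp [not_le.mpr hno2]
      simpa [List.getD_eq_getElem?_getD] using hno2
    · have : k + 1 - (j+1) = 0 := by omega
      simp [this]

-- some hit in the window ⇒ the window find? is some
lemma wnd_hit (A : List Int) (j k j' : Nat) (h1 : j < j') (h2 : j' < k) (hk : k ≤ A.length)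
    (hge : A.getD j 0 ≤ A.getD j' 0) :
    ((A.drop (j+1)).take (k - (j+1))).find? (fun x => decide (A.getD j 0 ≤ x)) ≠ none := by
  intro hnone
  rw [List.find?_eq_none] at hnone
  have hmem : A.getD j' 0 ∈ (A.drop (j+1)).take (k - (j+1)) := by
    have hlt : j' - (j+1) < ((A.drop (j+1)).take (k - (j+1))).length := by
      simp; omega
    have : ((A.drop (j+1)).take (k - (j+1)))[j' - (j+1)]'hlt = A.getD j' 0 := by
      rw [List.getElem_take, List.getElem_drop, List.getD_eq_getElem _ _ (by omega)]
      congr 1; omega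
    rw [← this]; exact List.getElem_mem hlt
  have h3 := hnone _ hmem
  simp only [decide_eq_true_eq] at h3
  exact h3 hge

-- in a region where every stack member above b has value ≤ v, every index has value ≤ v
lemma seg_le (A : List Int) (v : Int) (k : Nat) (s : List Nat) (b : Nat)
    (M : ∀ j, j ∈ s ↔ j < k ∧ ∀ j', j < j' → j' < k → A.getD j' 0 < A.getD j 0)
    (hb : ∀ x, x ∈ s → b ≤ x → A.getD x 0 ≤ v) :
    ∀ m j, k - j ≤ m → b ≤ j → j < k → A.getD j 0 ≤ v := by
  intro m
  induction m with
  | zero => intro j h1 _ h3; omega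
  | succ m ih =>
    intro j h1 h2 h3
    by_contra hgt
    push_neg at hgt
    have hmem : j ∈ s := by
      rw [M]
      refine ⟨h3, fun j' hlt hltk => ?_⟩
      have := ih j' (by omega) (by omega) hltk
      omega
    have := hb j hmem h2
    omega

-- downward scan: everything in (t,k) is ≤ v and A[t] > v ⇒ prevG finds A[t]
lemma findRev_some (A : List Int) (v : Int) (t : Nat) (hv : v < A.getD t 0) :
    ∀ k, k ≤ A.length → t < k → (∀ j, t < j → j < k → A.getD j 0 ≤ v) →
      ((A.take k).reverse).find? (fun x => decide (v < x)) = some (A.getD t 0) := by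
  intro k
  induction k with
  | zero => intro _ h _; omega
  | succ k ih =>
    intro hk ht hle
    rw [take_succ_reverse A k (by omega)]
    by_cases htk : t = k
    · subst htk
      rw [List.find?_cons_of_pos (by simpa using hv)]
    · have hkle := hle k (by omega) (by omega)
      have hnv : ¬ (v < A.getD k 0) := by omega
      rw [List.find?_cons_of_neg (by simpa using hnv)]
      exact ih (by omega) (by omega) (fun j h1 h2 => hle j h1 (by omega))

-- downward scan: everything < k is ≤ v ⇒ prevG finds nothing
lemma findRev_none (A : List Int) (v : Int) :
    ∀ k, k ≤ A.length → (∀ j, j < k → A.getD j 0 ≤ v) →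
      ((A.take k).reverse).find? (fun x => decide (v < x)) = none := by
  intro k
  induction k with
  | zero => intro _ _; simp
  | succ k ih =>
    intro hk hle
    rw [take_succ_reverse A k (by omega)]
    have := hle k (by omega)
    have hnv : ¬ (v < A.getD k 0) := by omega
    rw [List.find?_cons_of_neg (by simpa using hnv)]
    exact ih (by omega) (fun j h => hle j (by omega))

lemma dropWhile_head_false {α : Type} (p : α → Bool) :
    ∀ (s : List α) (t : α) (rest : List α), s.dropWhile p = t :: rest → p t = false := by
  intro s
  induction s with
  | nil => simp [List.dropWhile_nil]
  | cons a s ih =>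
    intro t rest h
    by_cases hp : p a
    · rw [List.dropWhile_cons_of_pos hp] at h; exact ih _ _ h
    · rw [List.dropWhile_cons_of_neg hp] at h
      cases h; simpa using hp

lemma inv_step (A : List Int) (k : Nat) (s : List Nat) (l r : List Int)
    (hk : k < A.length) (hInv : InvQ A k s l r) :
    InvQ A (k+1) (k :: (popPhase A (A.getD k 0) s r).1)
      (match (popPhase A (A.getD k 0) s r).1 with
        | [] => l
        | t :: _ => l.set k (A.getD t 0))
      (popPhase A (A.getD k 0) s r).2 := by
  obtain ⟨M, Srt, hlLen, hl, hrLen, hr⟩ := hInv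
  set v := A.getD k 0 with hv
  set P : Nat → Bool := fun t => decide (A.getD t 0 ≤ v) with hP
  rw [popPhase_eq]
  have hsplit : s.takeWhile P ++ s.dropWhile P = s := List.takeWhile_append_dropWhile
  have htw : ∀ x ∈ s.takeWhile P, A.getD x 0 ≤ v := by
    intro x hx
    have := List.mem_takeWhile_imp hx
    simpa [hP] using this
  have hsk : ∀ x ∈ s, x < k := fun x hx => ((M x).1 hx).1
  have hsv : ∀ a b, a ∈ s → b ∈ s → b < a → A.getD a 0 < A.getD b 0 := by
    intro a b ha hb hba
    exact ((M b).1 hb).2 a hba (hsk a ha)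
  have hdw_sub : ∀ x ∈ s.dropWhile P, x ∈ s := by
    intro x hx
    rw [← hsplit]; exact List.mem_append_right _ hx
  have hdw_sorted : (s.dropWhile P).Pairwise (· > ·) := Srt.sublist (List.dropWhile_sublist P)
  have hdwv : ∀ x ∈ s.dropWhile P, v < A.getD x 0 := by
    rcases hdq : s.dropWhile P with _ | ⟨t, rest⟩
    · intro x hx; cases hx
    · intro x hx
      rw [hdq] at hdw_sorted
      have hPt : P t = false := dropWhile_head_false P s t rest hdq
      have hvt : v < A.getD t 0 := by
        simp only [hP, decide_eq_false_iff_not, not_le] at hPt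
        exact hPt
      rw [List.mem_cons] at hx
      rcases hx with hx | hx
      · rw [hx]; exact hvt
      · have hxt : x < t := (List.pairwise_cons.mp hdw_sorted).1 x hx
        have hts : t ∈ s := hdw_sub t (by rw [hdq]; exact List.mem_cons_self)
        have hxs : x ∈ s := hdw_sub x (by rw [hdq]; exact List.mem_cons_of_mem _ hx)
        have := hsv t x hts hxs hxt
        omega
  have hdw_lt_k : ∀ x ∈ s.dropWhile P, x < k := fun x hx => hsk x (hdw_sub x hx)
  have hble : ∀ b, (∀ x ∈ s, b ≤ x → A.getD x 0 ≤ v) → ∀ j, b ≤ j → j < k → A.getD j 0 ≤ v := by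
    intro b hb j h1 h2
    exact seg_le A v k s b M hb k j (by omega) h1 h2
  -- new-stack membership characterisation
  have M' : ∀ j, j ∈ k :: s.dropWhile P ↔
      j < k + 1 ∧ ∀ j', j < j' → j' < k + 1 → A.getD j' 0 < A.getD j 0 := by
    intro j
    constructor
    · intro hj
      rw [List.mem_cons] at hj
      rcases hj with hj | hj
      · subst hj; exact ⟨by omega, fun j' h1 h2 => by omega⟩
      · have hjs := hdw_sub j hj
        have hjk := hsk j hjs
        refine ⟨by omega, fun j' h1 h2 => ?_⟩
        by_cases hj' : j' = k
        · subst hj'; exact hdwv j hj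
        · exact ((M j).1 hjs).2 j' h1 (by omega)
    · rintro ⟨h1, h2⟩
      by_cases hjk : j = k
      · subst hjk; exact List.mem_cons_self
      · have hjlt : j < k := by omega
        have hjs : j ∈ s := (M j).2 ⟨hjlt, fun j' ha hb => h2 j' ha (by omega)⟩
        have hvj : v < A.getD j 0 := h2 k hjlt (by omega)
        have hjtw : j ∉ s.takeWhile P := by
          intro hjt
          have := htw j hjt; omega
        right
        rw [← hsplit] at hjs
        rcases List.mem_append.mp hjs with h | h
        · exact absurd h hjtw
        · exact h
  refine ⟨M', ?_, ?_, ?_, ?_, ?_⟩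
  · exact List.pairwise_cons.mpr ⟨fun x hx => hdw_lt_k x hx, hdw_sorted⟩
  · rcases hdq : s.dropWhile P with _ | ⟨t, rest⟩ <;> simp [hlLen]
  · -- the l array
    intro i hi
    rcases hdq : s.dropWhile P with _ | ⟨t, rest⟩
    · simp only
      rw [hl i hi]
      by_cases hik : i = k
      · subst hik
        have hall : ∀ j, j < i → A.getD j 0 ≤ v := by
          intro j hj
          refine hble 0 ?_ j (by omega) hj
          intro x hx _
          rw [← hsplit, hdq, List.append_nil] at hx
          exact htw x hx
        have hpg : prevG A i = -1 := by
          unfold prevG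
          rw [← hv, findRev_none A v i (by omega) hall]
          rfl
        rw [if_neg (by omega), if_pos (by omega), hpg]
      · by_cases h : i < k
        · rw [if_pos h, if_pos (by omega)]
        · rw [if_neg h, if_neg (by omega)]
    · simp only
      have hts : t ∈ s := hdw_sub t (by rw [hdq]; exact List.mem_cons_self)
      have htk : t < k := hsk t hts
      have hvt : v < A.getD t 0 := hdwv t (by rw [hdq]; exact List.mem_cons_self)
      rw [hdq] at hdw_sorted
      by_cases hik : i = k
      · subst hik
        have hseg : ∀ j, t < j → j < i → A.getD j 0 ≤ v := by
          refine hble (t+1) ?_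
          intro x hx hbx
          rw [← hsplit, hdq] at hx
          rcases List.mem_append.mp hx with h | h
          · exact htw x h
          · rw [List.mem_cons] at h
            rcases h with h | h
            · omega
            · have hxt : x < t := (List.pairwise_cons.mp hdw_sorted).1 x h
              omega
        have hfind : prevG A i = A.getD t 0 := by
          unfold prevG
          rw [← hv, findRev_some A v t hvt i (by omega) htk hseg]
          rfl
        have hset : (l.set i (A.getD t 0)).getD i 0 = A.getD t 0 := by
          simp [List.getD_eq_getElem?_getD, List.getElem?_set, hlLen, hk]
        rw [hset, hfind, if_pos (by omega)]
      · have hset : (l.set k (A.getD t 0)).getD i 0 = l.getD i 0 := by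
          simp [List.getD_eq_getElem?_getD, List.getElem?_set, Ne.symm hik]
        rw [hset, hl i hi]
        by_cases h : i < k
        · rw [if_pos h, if_pos (by omega)]
        · rw [if_neg h, if_neg (by omega)]
  · rw [foldl_set_length]; exact hrLen
  · -- the r array
    intro j hj
    rw [foldl_set_getD v _ r j (by omega), hr j hj]
    by_cases hjtw : j ∈ s.takeWhile P
    · -- j is popped now: its window gains A[k], the first hit
      have hjs : j ∈ s := by rw [← hsplit]; exact List.mem_append_left _ hjtw
      have hjk : j < k := hsk j hjs
      have hjle : A.getD j 0 ≤ v := htw j hjtw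
      have hnone := wnd_none A j k (by omega) ((M j).1 hjs).2
      rw [if_pos hjtw]
      unfold rAt
      rw [wnd_succ A j k hjk hk, List.find?_append, hnone]
      have hle2 : A.getD j 0 ≤ A.getD k 0 := by rw [← hv]; exact hjle
      rw [Option.none_or, List.find?_cons_of_pos (by simpa using hle2), Option.getD_some]
    · rw [if_neg hjtw]
      by_cases hjk : j < k
      · by_cases hjs : j ∈ s
        · -- j survives on the stack: still no hit, A[k] < A[j]
          have hjdw : j ∈ s.dropWhile P := by
            rw [← hsplit] at hjs
            rcases List.mem_append.mp hjs with h | h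
            · exact absurd h hjtw
            · exact h
          have hvj : v < A.getD j 0 := hdwv j hjdw
          have hnone := wnd_none A j k (by omega) ((M j).1 hjs).2
          unfold rAt
          rw [wnd_succ A j k hjk hk, List.find?_append, hnone]
          have hnle : ¬ (A.getD j 0 ≤ A.getD k 0) := by rw [← hv]; omega
          rw [Option.none_or, List.find?_cons_of_neg (by simpa using hnle)]
          rfl
        · -- j was resolved before: the old window already holds the first hit
          obtain ⟨j', h1, h2, h3⟩ : ∃ j', j < j' ∧ j' < k ∧ A.getD j 0 ≤ A.getD j' 0 := by
            by_contra hno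
            push_neg at hno
            exact hjs ((M j).2 ⟨hjk, fun j' ha hb => by
              have := hno j' ha hb; omega⟩)
          have hsome := wnd_hit A j k j' h1 h2 (by omega) h3
          unfold rAt
          rw [wnd_succ A j k hjk hk, List.find?_append]
          cases hfo : ((A.drop (j+1)).take (k - (j+1))).find? (fun x => decide (A.getD j 0 ≤ x)) with
          | none => exact absurd hfo hsome
          | some x => simp
      · -- j ≥ k: both windows are empty
        have h1 : k - (j+1) = 0 := by omega
        have h2 : k + 1 - (j+1) = 0 := by omega
        unfold rAt
        rw [h1, h2]

lemma aLoop_run (A : List Int) :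
    ∀ (m k : Nat) (s : List Nat) (l r : List Int), k + m = A.length → InvQ A k s l r →
      aLoop A (((List.range A.length).map (fun i => (i, A.getD i 0))).drop k) s l r
        = decreasing_queue_alt A := by
  intro m
  induction m with
  | zero =>
    intro k s l r hkm hInv
    obtain ⟨M, Srt, hlLen, hl, hrLen, hr⟩ := hInv
    have hk : k = A.length := by omega
    subst hk
    rw [List.drop_eq_nil_of_le (by simp)]
    show (l, r) = decreasing_queue_alt A
    unfold decreasing_queue_alt
    refine Prod.ext ?_ ?_
    · apply List.ext_getElem (by simp [hlLen])
      intro i h1 h2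
      have hi : i < A.length := by simpa using h2
      have := hl i hi
      rw [List.getD_eq_getElem l 0 (by omega)] at this
      simp only at this ⊢
      rw [this, if_pos hi]
      simp
    · apply List.ext_getElem (by simp [hrLen])
      intro j h1 h2
      have hj : j < A.length := by simpa using h2
      have := hr j hj
      rw [List.getD_eq_getElem r 0 (by omega)] at this
      simp only at this ⊢
      rw [this]
      have hlen : (A.drop (j+1)).length = A.length - (j+1) := by simp
      unfold rAt nextGE
      rw [← hlen, List.take_length]
      simp [nextGE]
  | succ m ih =>
    intro k s l r hkm hInv
    have hk : k < A.length := by omega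
    have hdropstep : ((List.range A.length).map (fun i => (i, A.getD i 0))).drop k
        = (k, A.getD k 0) :: ((List.range A.length).map (fun i => (i, A.getD i 0))).drop (k+1) := by
      rw [List.drop_eq_getElem_cons (by simpa using hk)]
      congr 1
      simp
    rw [hdropstep]
    simp only [aLoop]
    exact ih (k+1) _ _ _ (by omega) (inv_step A k s l r hk hInv)

-- ===== VERDICT (by name: the statement is the Claim_ definition above) =====
theorem decreasing_queue_spec : Claim_equal_decreasing_queue := by
  intro A _
  show decreasing_queue A = decreasing_queue_alt A
  have h0 : InvQ A 0 [] (List.replicate A.length (-1)) (List.replicate A.length (-1)) := by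
    refine ⟨by simp, by simp, by simp, ?_, by simp, ?_⟩
    · intro i hi; simp [hi]
    · intro j hj; simp [hj, rAt]
  have := aLoop_run A A.length 0 [] _ _ (by omega) h0
  simpa [decreasing_queue] using this
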